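-- pv_equiv track=rewrite | github.com/plomgrading/plom | plom/solutions/extractSolutions.py | isContiguousListPosInt
-- ===== SOURCE A (Python) =====
-- def isPositiveInt(s):
--     try:
--         n = int(s)
--         if n > 0:
--             return True
--         else:
--             return False
--     except ValueError:
--         return False
--
-- def isContiguousListPosInt(l, lastPage):
--     # check it is a list
--     if type(l) is not list:
--         return False
--     # check each entry is 0<n<=lastPage
--     for n in l:
--         if not isPositiveInt(n):
--             return False
--         if n > lastPage:
--             return False
--     # check it is contiguous
--     sl = set(l)
--     for n in range(min(sl), max(sl) + 1):
--         if n not in sl: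
--             return False
--     # all tests passed
--     return True
-- ===== SOURCE B (Python) =====
-- def isPositiveInt(s):
--     try:
--         n = int(s)
--         if n > 0:
--             return True
--         else:
--             return False
--     except ValueError:
--         return False
--
--
-- def isContiguousListPosInt(l, lastPage):
--     if type(l) is not list:
--         return False
--     # every entry must be a positive int not exceeding lastPage
--     if any(not isPositiveInt(n) or n > lastPage for n in l):
--         return False
--     # the distinct values, walked in sorted order, must count up from the minimum
--     expected = min(l)
--     for n in sorted(set(l)):
--         if n != expected:
--             return False
--         expected += 1
--     return True
-- ===== Notes on version B (the rewrite author's own statement) =====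
-- stated objective: alternative
-- what changed: Contiguity is checked by walking the sorted distinct values with a running counter instead of testing every integer of range(min,max+1) for set membership.
import Mathlib
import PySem

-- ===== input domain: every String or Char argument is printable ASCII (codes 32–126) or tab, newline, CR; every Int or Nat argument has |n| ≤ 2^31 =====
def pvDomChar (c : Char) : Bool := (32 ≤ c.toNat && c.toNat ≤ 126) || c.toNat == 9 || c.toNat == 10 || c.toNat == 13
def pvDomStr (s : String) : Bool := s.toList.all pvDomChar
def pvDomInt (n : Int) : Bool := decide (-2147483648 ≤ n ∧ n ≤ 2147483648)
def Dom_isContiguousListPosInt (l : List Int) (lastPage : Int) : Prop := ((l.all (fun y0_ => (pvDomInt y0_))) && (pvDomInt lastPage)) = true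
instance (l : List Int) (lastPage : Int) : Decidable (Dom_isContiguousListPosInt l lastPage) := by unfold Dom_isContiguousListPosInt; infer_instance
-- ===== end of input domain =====

-- B checks contiguity by walking the sorted distinct values with a running counter
-- instead of A's membership scan over range(min, max+1); same return value on every
-- non-empty list (both raise ValueError on the empty list, which Pre_ excludes).


-- ===== PORT A =====
-- helper isPositiveInt: int(s) never raises on an int argument, so it is just n > 0
def isPositiveInt (n : Int) : Bool := if n > 0 then true else false

-- first loop of A: 'for n in l: if not isPositiveInt(n): return False; if n > lastPage: return False'
def pvCheckLoopA (lastPage : Int) : List Int → Bool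
  | [] => true
  | n :: t =>
    if !(isPositiveInt n) then false
    else if n > lastPage then false
    else pvCheckLoopA lastPage t

-- second loop of A: 'for n in range(min(sl), max(sl)+1): if n not in sl: return False'
def pvRangeLoopA (sl : PySem.Set Int) : List Int → Bool
  | [] => true
  | n :: t => if !(PySem.Set.contains sl n) then false else pvRangeLoopA sl t

def isContiguousListPosInt (l : List Int) (lastPage : Int) : Bool :=
  if !(pvCheckLoopA lastPage l) then false
  else
    let sl := PySem.Set.ofList l
    match PySem.List.min? sl (fun x => x), PySem.List.max? sl (fun x => x) with
    | some m, some M => pvRangeLoopA sl (PySem.List.pyRange m (M + 1) 1)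
    | _, _ => false   -- min()/max() of the empty set: ValueError, excluded by Pre_

-- ===== PORT B =====
-- 'for n in sorted(set(l)): if n != expected: return False; expected += 1'
def pvWalkB : List Int → Int → Bool
  | [], _ => true
  | n :: t, e => if n ≠ e then false else pvWalkB t (e + 1)

def isContiguousListPosInt_alt (l : List Int) (lastPage : Int) : Bool :=
  if l.any (fun n => !(isPositiveInt n) || n > lastPage) then false
  else
    match PySem.List.min? l (fun x => x) with
    | none => false   -- min([]) : ValueError, excluded by Pre_
    | some m => pvWalkB (PySem.List.sorted (PySem.Set.ofList l) (fun x => x) false) m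

-- ===== PRECONDITION & SPEC =====
-- Pre_ excludes only the empty list, on which A raises ValueError (min of an empty set).
def Pre_isContiguousListPosInt (l : List Int) (lastPage : Int) : Prop := l ≠ []
instance (l : List Int) (lastPage : Int) : Decidable (Pre_isContiguousListPosInt l lastPage) := by unfold Pre_isContiguousListPosInt; infer_instance

def pvWitness_isContiguousListPosInt : List Int × Int := ([2, 1, 3], 5)

def Spec_isContiguousListPosInt (l : List Int) (lastPage : Int) (out : Bool) : Prop := out = isContiguousListPosInt_alt l lastPage
instance (l : List Int) (lastPage : Int) (out : Bool) : Decidable (Spec_isContiguousListPosInt l lastPage out) := by unfold Spec_isContiguousListPosInt; infer_instance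

-- ===== CLAIM (what is proved, stated in full; the proofs are below) =====
def Claim_equal_isContiguousListPosInt : Prop := ∀ (l : List Int) (lastPage : Int), Dom_isContiguousListPosInt l lastPage → Pre_isContiguousListPosInt l lastPage → Spec_isContiguousListPosInt l lastPage (isContiguousListPosInt l lastPage)

-- ===== LEMMAS AND PROOFS =====

-- A's element loop is the negation of B's 'any' test
theorem pvCheckLoopA_eq_not_any (lastPage : Int) (l : List Int) :
    pvCheckLoopA lastPage l = !(l.any (fun n => !(isPositiveInt n) || n > lastPage)) := by
  induction l with
  | nil => rfl
  | cons n t ih =>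
    simp only [pvCheckLoopA, List.any_cons]
    by_cases h1 : isPositiveInt n
    · by_cases h2 : n > lastPage <;> simp [h1, h2, ih]
    · simp [h1]

theorem pvRangeLoopA_eq_all (sl : PySem.Set Int) (r : List Int) :
    pvRangeLoopA sl r = r.all (fun n => PySem.Set.contains sl n) := by
  induction r with
  | nil => rfl
  | cons n t ih =>
    simp only [pvRangeLoopA, List.all_cons]
    by_cases h : PySem.Set.contains sl n <;> simp [h, ih]

-- the walk succeeds exactly on the counted-up range
theorem pvWalkB_true_iff (s : List Int) (e : Int) :
    pvWalkB s e = true ↔ s = PySem.List.pyRange e (e + s.length) 1 := by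
  induction s generalizing e with
  | nil => simp [pvWalkB, PySem.List.pyRange_one_eq_nil (le_refl e)]
  | cons n t ih =>
    rw [show (e + ((n :: t).length : Int)) = (e + 1) + t.length by simp; ring,
        PySem.List.pyRange_one_cons (by have := Int.natCast_nonneg t.length; omega)]
    simp only [pvWalkB]
    by_cases h : n = e
    · simp [h, ih]
    · simp [h]

-- ===== VERDICT (by name: the statement is the Claim_ definition above) =====
theorem isContiguousListPosInt_spec : Claim_equal_isContiguousListPosInt := by
  intro l lastPage _ hpre
  unfold Spec_isContiguousListPosInt isContiguousListPosInt isContiguousListPosInt_alt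
  rw [pvCheckLoopA_eq_not_any]
  by_cases hany : l.any (fun n => !(isPositiveInt n) || n > lastPage)
  · simp [hany]
  · simp only [hany, Bool.not_false, Bool.not_true, if_false, Bool.false_eq_true]
    -- l is nonempty, so min?/max? are some
    obtain ⟨m, hm⟩ : ∃ m, PySem.List.min? l (fun x => x) = some m := by
      cases h : PySem.List.min? l (fun x => x) with
      | none => exact absurd ((PySem.List.min?_eq_none_iff l (fun x => x)).mp h) hpre
      | some m => exact ⟨m, rfl⟩
    set sl : PySem.Set Int := PySem.Set.ofList l with hsl
    have hslne : sl ≠ [] := by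
      have hmsl : m ∈ sl := (PySem.Set.mem_ofList l m).mpr (PySem.List.min?_mem hm)
      intro h; rw [h] at hmsl; exact absurd hmsl (List.not_mem_nil)
    obtain ⟨m', hm'⟩ : ∃ m', PySem.List.min? sl (fun x => x) = some m' := by
      cases h : PySem.List.min? sl (fun x => x) with
      | none => exact absurd ((PySem.List.min?_eq_none_iff sl (fun x => x)).mp h) hslne
      | some m' => exact ⟨m', rfl⟩
    obtain ⟨M, hM⟩ : ∃ M, PySem.List.max? sl (fun x => x) = some M := by
      cases h : PySem.List.max? sl (fun x => x) with
      | none => exact absurd ((PySem.List.max?_eq_none_iff sl (fun x => x)).mp h) hslne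
      | some M => exact ⟨M, rfl⟩
    -- min over the set equals min over the list
    have hmemsl : ∀ x : Int, x ∈ sl ↔ x ∈ l := by
      intro x; exact PySem.Set.mem_ofList l x
    have hmm' : m' = m := by
      have h1 : m ∈ l := PySem.List.min?_mem hm
      have h2 : m' ∈ sl := PySem.List.min?_mem hm'
      have h3 := PySem.List.min?_isMin hm m' ((hmemsl m').mp h2)
      have h4 := PySem.List.min?_isMin hm' m ((hmemsl m).mpr h1)
      omega
    rw [hm, hm', hM, hmm']
    simp only []
    rw [pvRangeLoopA_eq_all]
    -- both sides are Booleans: prove the ↔ of being true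
    have hMmem : M ∈ l := (hmemsl M).mp (PySem.List.max?_mem hM)
    have hmMin : ∀ y ∈ l, m ≤ y := fun y hy => PySem.List.min?_isMin hm y hy
    have hMMax : ∀ y ∈ l, y ≤ M := fun y hy => PySem.List.max?_isMax hM y ((hmemsl y).mpr hy)
    have hnodup : sl.Nodup := PySem.Set.nodup_ofList l
    apply Bool.eq_iff_iff.mpr
    rw [pvWalkB_true_iff, List.all_eq_true]
    set ss := PySem.List.sorted sl (fun x => x) false with hss
    have hperm : ss.Perm sl := PySem.List.sorted_perm sl (fun x => x) false
    have hchain : ss.Pairwise (· < ·) := PySem.List.sorted_ofList_pairwise_lt l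
    constructor
    · -- range check ⟹ sorted walk
      intro hall
      have hmem : ∀ x : Int, x ∈ sl ↔ m ≤ x ∧ x < M + 1 := by
        intro x
        constructor
        · intro hx
          have := hmMin x ((hmemsl x).mp hx)
          have := hMMax x ((hmemsl x).mp hx)
          omega
        · intro hx
          have := hall x (by rw [PySem.List.mem_pyRange_one]; omega)
          exact (PySem.Set.contains_iff sl x).mp this
      have hperm2 : (PySem.List.pyRange m (M + 1) 1).Perm sl := by
        rw [List.perm_ext_iff_of_nodup (PySem.List.nodup_pyRange_one m (M + 1)) hnodup]
        intro x
        rw [PySem.List.mem_pyRange_one, hmem]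
      have : ss = PySem.List.pyRange m (M + 1) 1 :=
        PySem.List.sorted_eq_of_perm_of_pairwise_lt sl (PySem.List.pyRange m (M + 1) 1) (fun x => x) hperm2 (PySem.List.pairwise_lt_pyRange_one m (M + 1))
      rw [this, PySem.List.length_pyRange_one]
      congr 1
      have hmM : m ≤ M := hmMin M hMmem
      omega
    · -- sorted walk ⟹ range check
      intro heq n hn
      rw [PySem.List.mem_pyRange_one] at hn
      apply (PySem.Set.contains_iff sl n).mpr
      have hlen : M ∈ ss := hperm.mem_iff.mpr ((hmemsl M).mpr hMmem)
      rw [heq, PySem.List.mem_pyRange_one] at hlen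
      have : n ∈ ss := by
        rw [heq, PySem.List.mem_pyRange_one]; omega
      exact hperm.mem_iff.mp this
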